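-- pv_equiv track=rewrite | github.com/BehruzMaxmudov1203/py-oop-practice | TextMaxNumber/TextMaxNumber.py | get_max_number
-- ===== SOURCE A (Python) =====
-- def get_max_number(text: str) -> int | None:
--     """
--     Finds the largest positive number in the text.
--     Returns None if no number exists.
--     """
--     number = ""
--     max_number = None
--
--     for char in text:
--         if char.isdigit():
--             number += char
--         else:
--             if number:
--                 num = int(number)
--                 if max_number is None or num > max_number:
--                     max_number = num
--                 number = ""
--     # Check if last number at end of text
--     if number:
--         num = int(number)
--         if max_number is None or num > max_number:
--             max_number = num
--
--     return max_number
-- ===== SOURCE B (Python) =====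
-- def get_max_number(text: str) -> int | None:
--     """
--     Finds the largest positive number in the text.
--     Returns None if no number exists.
--
--     Tokenize-then-reduce: blank out every non-digit character, split the
--     result into the maximal digit runs, convert them all, take the max.
--     """
--     tokens = "".join(c if c.isdigit() else " " for c in text).split()
--     nums = [int(t) for t in tokens]
--     return max(nums) if nums else None
-- ===== Notes on version B (the rewrite author's own statement) =====
-- stated objective: idiomatic
-- what changed: Replaces A's single streaming scan with a running max and end-of-text flush by a tokenize-all-then-reduce pipeline: blank out non-digits, split() into digit runs, map int, reduce with max().
import Mathlib
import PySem

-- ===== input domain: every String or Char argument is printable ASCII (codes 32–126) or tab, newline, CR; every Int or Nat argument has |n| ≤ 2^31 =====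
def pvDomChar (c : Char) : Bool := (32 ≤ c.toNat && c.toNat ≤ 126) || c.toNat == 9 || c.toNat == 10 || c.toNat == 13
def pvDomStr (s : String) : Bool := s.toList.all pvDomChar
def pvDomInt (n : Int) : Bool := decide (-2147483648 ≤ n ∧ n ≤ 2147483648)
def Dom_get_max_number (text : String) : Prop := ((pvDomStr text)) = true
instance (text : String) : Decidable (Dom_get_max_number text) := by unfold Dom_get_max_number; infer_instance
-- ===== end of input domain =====

-- B rewrites A's streaming scan (running max + end-of-text flush) as a tokenize-then-reduce
-- pipeline (blank out non-digits, split into digit runs, map int, max); idiomatic, same cost.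

-- ===== PORT A =====
-- A's loop body: one character of the streaming scan; state = (number so far, running max)
def pvStepA (st : List Char × Option Int) (c : Char) : List Char × Option Int :=
  if PySem.Chars.isdigit c then (st.1 ++ [c], st.2)
  else
    if st.1.isEmpty then st
    else
      -- int(number): number is a nonempty digit run, so int() never raises; getD 0 is unreachable
      let num := (PySem.Int.ofChars? st.1).getD 0
      (([] : List Char),
        match st.2 with
        | none => some num
        | some m => if m < num then some num else some m)

def get_max_number (text : String) : Option Int :=
  let st := text.toList.foldl pvStepA (([] : List Char), (none : Option Int))
  if st.1.isEmpty then st.2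
  else
    let num := (PySem.Int.ofChars? st.1).getD 0
    match st.2 with
    | none => some num
    | some m => if m < num then some num else some m

-- ===== PORT B =====
def get_max_number_alt (text : String) : Option Int :=
  let tokens := PySem.Chars.split₀ (text.toList.map (fun c => if PySem.Chars.isdigit c then c else ' '))
  let nums := tokens.map (fun t => (PySem.Int.ofChars? t).getD 0)
  PySem.List.max? nums id

-- ===== PRECONDITION & SPEC =====
def Spec_get_max_number (text : String) (out : Option Int) : Prop := out = get_max_number_alt text
instance (text : String) (out : Option Int) : Decidable (Spec_get_max_number text out) := by unfold Spec_get_max_number; infer_instance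

-- ===== CLAIM (what is proved, stated in full; the proofs are below) =====
def Claim_equal_get_max_number : Prop := ∀ (text : String), Dom_get_max_number text → Spec_get_max_number text (get_max_number text)

-- ===== LEMMAS AND PROOFS =====

def pvIntval (t : List Char) : Int := (PySem.Int.ofChars? t).getD 0

def pvUpd (m : Option Int) (n : Int) : Option Int :=
  match m with
  | none => some n
  | some mm => if mm < n then some n else some mm

def pvFlush (st : List Char × Option Int) : Option Int :=
  if st.1.isEmpty then st.2 else pvUpd st.2 (pvIntval st.1)

def pvRepl (c : Char) : Char := if PySem.Chars.isdigit c then c else ' '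

-- the maximal digit runs of the list, r being the run accumulated so far
def pvRuns : List Char → List Char → List (List Char)
  | [], r => if r.isEmpty then [] else [r]
  | c :: t, r =>
      if PySem.Chars.isdigit c then pvRuns t (r ++ [c])
      else if r.isEmpty then pvRuns t [] else r :: pvRuns t []

theorem pv_isspace_of_isdigit (c : Char) (h : PySem.Chars.isdigit c = true) :
    PySem.Chars.isspace c = false := by
  have h1 : '0' ≤ c ∧ c ≤ '9' := by simpa [PySem.Chars.isdigit] using h
  obtain ⟨a, b⟩ := h1
  rw [Char.le_def] at a b
  rw [UInt32.le_iff_toNat_le] at a b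
  have e0 : ('0' : Char).val.toNat = 48 := by decide
  have e9 : ('9' : Char).val.toNat = 57 := by decide
  rw [e0] at a
  rw [e9] at b
  simp only [PySem.Chars.isspace, Char.toNat, Bool.or_eq_false_iff, Bool.and_eq_false_iff,
    decide_eq_false_iff_not]
  omega

theorem pv_go_nil (cur : List Char) (acc : List (List Char)) :
    PySem.Chars.split₀.go [] cur acc =
      if cur.isEmpty then acc.reverse else (cur.reverse :: acc).reverse := by
  rw [PySem.Chars.split₀.go.eq_def]

theorem pv_go_cons_nonspace (c : Char) (hs : PySem.Chars.isspace c = false)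
    (rest cur : List Char) (acc : List (List Char)) :
    PySem.Chars.split₀.go (c :: rest) cur acc =
      PySem.Chars.split₀.go rest (c :: cur) acc := by
  rw [PySem.Chars.split₀.go.eq_def]
  simp [hs]

theorem pv_go_cons_space (c : Char) (hs : PySem.Chars.isspace c = true)
    (rest cur : List Char) (acc : List (List Char)) :
    PySem.Chars.split₀.go (c :: rest) cur acc =
      if cur.isEmpty then PySem.Chars.split₀.go rest [] acc
      else PySem.Chars.split₀.go rest [] (cur.reverse :: acc) := by
  rw [PySem.Chars.split₀.go.eq_def]
  simp [hs]

theorem pv_split_go_eq (l : List Char) : ∀ (r : List Char) (acc : List (List Char)),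
    PySem.Chars.split₀.go (l.map pvRepl) r.reverse acc = acc.reverse ++ pvRuns l r := by
  induction l with
  | nil =>
      intro r acc
      rw [List.map_nil, pv_go_nil]
      by_cases hr : r.isEmpty
      · simp [pvRuns, hr]
      · simp [pvRuns, hr]
  | cons c t ih =>
      intro r acc
      rw [List.map_cons]
      by_cases hd : PySem.Chars.isdigit c
      · have hs := pv_isspace_of_isdigit c hd
        have e : pvRepl c = c := by simp [pvRepl, hd]
        rw [e, pv_go_cons_nonspace c hs]
        have hrev : (c :: r.reverse) = (r ++ [c]).reverse := by simp
        rw [hrev, ih (r ++ [c]) acc]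
        simp [pvRuns, hd]
      · have e : pvRepl c = ' ' := by simp [pvRepl, hd]
        have hs : PySem.Chars.isspace ' ' = true := by decide
        rw [e, pv_go_cons_space ' ' hs]
        have h0 := ih [] acc
        have h1 := ih [] (r :: acc)
        simp only [List.reverse_nil] at h0 h1
        by_cases hr : r.isEmpty
        · have : r = [] := by simpa using hr
          subst this
          simp [pvRuns, hd, h0]
        · rw [if_neg (by simpa using hr), List.reverse_reverse, h1]
          simp [pvRuns, hd, hr, List.append_assoc]

theorem pv_fold_eq (l : List Char) : ∀ (r : List Char) (m : Option Int),
    pvFlush (l.foldl pvStepA (r, m)) = ((pvRuns l r).map pvIntval).foldl pvUpd m := by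
  induction l with
  | nil =>
      intro r m
      by_cases hr : r.isEmpty <;>
        simp [pvFlush, pvRuns, hr]
  | cons c t ih =>
      intro r m
      by_cases hd : PySem.Chars.isdigit c
      · rw [List.foldl_cons]
        have e : pvStepA (r, m) c = (r ++ [c], m) := by simp [pvStepA, hd]
        rw [e, ih]
        simp [pvRuns, hd]
      · by_cases hr : r.isEmpty
        · have : r = [] := by simpa using hr
          subst this
          rw [List.foldl_cons]
          have e : pvStepA ([], m) c = ([], m) := by simp [pvStepA, hd]
          rw [e, ih]
          simp [pvRuns, hd]
        · rw [List.foldl_cons]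
          have e : pvStepA (r, m) c = ([], pvUpd m (pvIntval r)) := by
            cases m <;> simp [pvStepA, hd, hr, pvUpd, pvIntval]
          rw [e, ih]
          simp [pvRuns, hd, hr]

theorem pv_max_eq (xs : List Int) : PySem.List.max? xs id = xs.foldl pvUpd none := by
  unfold PySem.List.max?
  refine List.foldl_ext _ _ _ (fun a b _ => ?_)
  cases a <;> rfl

-- ===== VERDICT (by name: the statement is the Claim_ definition above) =====
theorem get_max_number_spec : Claim_equal_get_max_number := by
  intro text _
  unfold Spec_get_max_number
  have hA : get_max_number text = pvFlush (text.toList.foldl pvStepA ([], none)) := rfl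
  have hB : get_max_number_alt text
      = PySem.List.max? ((PySem.Chars.split₀ (text.toList.map pvRepl)).map pvIntval) id := rfl
  have hgo : PySem.Chars.split₀ (text.toList.map pvRepl) = pvRuns text.toList [] := by
    have h := pv_split_go_eq text.toList [] []
    simpa [PySem.Chars.split₀] using h
  rw [hA, hB, hgo, pv_max_eq, pv_fold_eq]
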